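-- pv_equiv track=rewrite | github.com/shin0park/Algorithm-Problems | samsung/python/드래곤커브.py | new_generation_curve
-- ===== SOURCE A (Python) =====
-- def translation(curve, dx, dy):
--     result = []
--     for i, j in curve:
--         result.append([i + dx, j + dy])
--     return result
--
-- def new_generation_curve(curve):
--     result = []
--     end_x, end_y = curve[-1]
--     trans_curve = translation(curve, -end_x, -end_y)
--     for i, j in trans_curve:
--         result.append([-j, i])
--     result = translation(result, end_x, end_y)
--     result = result[::-1]
--     return curve + result[1:]
-- ===== SOURCE B (Python) =====
-- def new_generation_curve(curve):
--     # Composed affine map: each point (i, j) goes to (ex+ey-j, ey-ex+i), where (ex, ey) = curve[-1].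
--     ex, ey = curve[-1]
--     return curve + [[ex + ey - j, ey - ex + i] for i, j in reversed(curve[:-1])]
-- ===== Notes on version B (the rewrite author's own statement) =====
-- stated objective: simpler
-- what changed: Replaces the four list passes (translate to origin, rotate, translate back, reverse, concat-slice) by one comprehension applying the precomputed composed affine map (i,j) -> (ex+ey-j, ey-ex+i) to reversed(curve[:-1]).
import Mathlib
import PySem

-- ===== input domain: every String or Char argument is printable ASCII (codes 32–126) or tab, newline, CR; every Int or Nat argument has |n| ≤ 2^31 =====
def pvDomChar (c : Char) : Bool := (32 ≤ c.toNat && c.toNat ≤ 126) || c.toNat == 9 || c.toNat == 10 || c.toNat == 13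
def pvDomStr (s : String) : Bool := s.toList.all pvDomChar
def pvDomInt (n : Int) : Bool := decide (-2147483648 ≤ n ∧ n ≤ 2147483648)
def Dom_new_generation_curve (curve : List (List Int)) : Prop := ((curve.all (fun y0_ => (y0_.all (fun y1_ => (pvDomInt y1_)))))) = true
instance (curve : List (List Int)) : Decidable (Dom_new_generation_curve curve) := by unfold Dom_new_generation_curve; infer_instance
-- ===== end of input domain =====

-- B replaces A's four list passes (translate, rotate, translate back, reverse+slice) by one
-- pass applying the precomputed composed affine map to reversed(curve[:-1]) — objective: simpler.

-- ===== PORT A =====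
-- the '_ => result' branch is unreachable under Pre_ (Python raises ValueError on unpacking there)
def pyTranslation (curve : List (List Int)) (dx dy : Int) : List (List Int) :=
  curve.foldl (fun result p =>
    match p with
    | [i, j] => result ++ [[i + dx, j + dy]]
    | _ => result) []

def new_generation_curve (curve : List (List Int)) : List (List Int) :=
  match PySem.List.pyGet? curve (-1) with
  | none => []            -- IndexError (empty curve): excluded by Pre_
  | some p =>
    match p with
    | [end_x, end_y] =>
      let trans_curve := pyTranslation curve (-end_x) (-end_y)
      let result := trans_curve.foldl (fun r q =>
        match q with
        | [i, j] => r ++ [[-j, i]]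
        | _ => r) []
      let result := pyTranslation result end_x end_y
      let result := (PySem.List.slice? result none none (-1)).getD []   -- result[::-1]
      curve ++ PySem.List.slice result (some 1) none                    -- result[1:]
    | _ => []             -- ValueError on unpacking: excluded by Pre_

-- ===== PORT B =====
def new_generation_curve_alt (curve : List (List Int)) : List (List Int) :=
  match PySem.List.pyGet? curve (-1) with
  | none => []            -- IndexError (empty curve): excluded by Pre_
  | some p =>
    match p with
    | [ex, ey] =>
      curve ++ ((PySem.List.slice curve none (some (-1))).reverse.map
        (fun q =>
          match q with
          | [i, j] => [ex + ey - j, ey - ex + i]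
          | _ => q))
    | _ => []             -- ValueError on unpacking: excluded by Pre_

-- ===== PRECONDITION & SPEC =====
-- Python A raises IndexError on an empty curve and ValueError unless every point is a pair; exactly those inputs are excluded.
def Pre_new_generation_curve (curve : List (List Int)) : Prop :=
  curve ≠ [] ∧ ∀ p ∈ curve, p.length = 2
instance (curve : List (List Int)) : Decidable (Pre_new_generation_curve curve) := by
  unfold Pre_new_generation_curve; infer_instance
def pvWitness_new_generation_curve : List (List Int) := [[0, 0], [0, 1]]

def Spec_new_generation_curve (curve : List (List Int)) (out : List (List Int)) : Prop := out = new_generation_curve_alt curve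
instance (curve : List (List Int)) (out : List (List Int)) : Decidable (Spec_new_generation_curve curve out) := by unfold Spec_new_generation_curve; infer_instance

-- ===== CLAIM (what is proved, stated in full; the proofs are below) =====
def Claim_equal_new_generation_curve : Prop := ∀ (curve : List (List Int)), Dom_new_generation_curve curve → Pre_new_generation_curve curve → Spec_new_generation_curve curve (new_generation_curve curve)

-- ===== LEMMAS AND PROOFS =====

-- the composed affine map B applies in one pass
def pvAff (ex ey : Int) (q : List Int) : List Int :=
  match q with
  | [i, j] => [ex + ey - j, ey - ex + i]
  | _ => q

lemma pyTranslation_eq_map (xs : List (List Int)) (dx dy : Int) (acc : List (List Int))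
    (h : ∀ p ∈ xs, p.length = 2) :
    List.foldl (fun result p =>
      match p with
      | [i, j] => result ++ [[i + dx, j + dy]]
      | _ => result) acc xs
    = acc ++ xs.map (fun p =>
      match p with
      | [i, j] => [i + dx, j + dy]
      | _ => p) := by
  induction xs generalizing acc with
  | nil => simp
  | cons hd tl ih =>
    obtain ⟨a, b, rfl⟩ : ∃ a b, hd = [a, b] := by
      have h2 := h hd (by simp)
      match hd, h2 with
      | [a, b], _ => exact ⟨a, b, rfl⟩
    simp [ih _ (fun p hp => h p (by simp [hp]))]

lemma rot_eq_map (xs : List (List Int)) (acc : List (List Int))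
    (h : ∀ p ∈ xs, p.length = 2) :
    List.foldl (fun r q =>
      match q with
      | [i, j] => r ++ [[-j, i]]
      | _ => r) acc xs
    = acc ++ xs.map (fun p =>
      match p with
      | [i, j] => [-j, i]
      | _ => p) := by
  induction xs generalizing acc with
  | nil => simp
  | cons hd tl ih =>
    obtain ⟨a, b, rfl⟩ : ∃ a b, hd = [a, b] := by
      have h2 := h hd (by simp)
      match hd, h2 with
      | [a, b], _ => exact ⟨a, b, rfl⟩
    simp [ih _ (fun p hp => h p (by simp [hp]))]

-- A's three passes compose to B's single affine map, on pair-shaped points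
lemma passes_eq (xs : List (List Int)) (ex ey : Int) (h : ∀ p ∈ xs, p.length = 2) :
    pyTranslation
      (List.foldl (fun r q =>
        match q with
        | [i, j] => r ++ [[-j, i]]
        | _ => r) [] (pyTranslation xs (-ex) (-ey))) ex ey
    = xs.map (pvAff ex ey) := by
  unfold pyTranslation
  rw [pyTranslation_eq_map xs _ _ [] h]
  simp only [List.nil_append]
  rw [rot_eq_map _ [] (by
    intro p hp
    obtain ⟨q, hq, rfl⟩ := List.mem_map.mp hp
    have h2 := h q hq
    match q, h2 with
    | [a, b], _ => simp)]
  simp only [List.nil_append, List.map_map]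
  rw [pyTranslation_eq_map _ ex ey [] (by
    intro p hp
    obtain ⟨q, hq, rfl⟩ := List.mem_map.mp hp
    have h2 := h q hq
    match q, h2 with
    | [a, b], _ => simp)]
  simp only [List.nil_append, List.map_map]
  refine List.map_congr_left ?_
  intro p hp
  have h2 := h p hp
  match p, h2 with
  | [a, b], _ => simp only [Function.comp, pvAff, List.cons.injEq, and_true]; constructor <;> ring

-- ===== VERDICT (by name: the statement is the Claim_ definition above) =====
theorem new_generation_curve_spec : Claim_equal_new_generation_curve := by
  intro curve _ hpre
  obtain ⟨hne, h2⟩ := hpre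
  obtain ⟨ys, p, rfl⟩ : ∃ ys p, curve = ys ++ [p] := by
    rcases List.eq_nil_or_concat curve with h | ⟨ys, p, h⟩
    · exact absurd h hne
    · exact ⟨ys, p, by simpa using h⟩
  obtain ⟨ex, ey, rfl⟩ : ∃ a b, p = [a, b] := by
    have hl := h2 p (by simp)
    match p, hl with
    | [a, b], _ => exact ⟨a, b, rfl⟩
  unfold Spec_new_generation_curve new_generation_curve new_generation_curve_alt
  rw [PySem.List.pyGet?_neg_one_append_singleton]
  simp only
  rw [passes_eq _ ex ey h2]
  rw [PySem.List.slice?_none_none_neg_one]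
  simp only [Option.getD_some]
  rw [PySem.List.slice_from_one, PySem.List.slice_to_neg_one]
  congr 1
  -- (map f (ys ++ [ex,ey])).reverse.tail = ((ys ++ [[ex,ey]]).dropLast).reverse.map g
  rw [List.map_append, List.reverse_append]
  simp only [List.map_cons, List.map_nil, List.reverse_cons, List.reverse_nil, List.nil_append,
    List.dropLast_concat]
  rw [← List.map_reverse]
  refine List.map_congr_left ?_
  intro q hq
  have hl := h2 q (by simp [List.mem_reverse.mp hq])
  match q, hl with
  | [a, b], _ => simp [pvAff]
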